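-- pv_equiv track=rewrite | github.com/mirenk0/Algorithmic-Problems | 3-EfficientAlgorithms/samechar.py | count
-- ===== SOURCE A (Python) =====
-- def count(s):
--     if not s:
--         return 0
--
--     total_count = 0
--     current_count = 1
--
--     for i in range(1, len(s)):
--         if s[i] == s[i - 1]:
--             current_count += 1
--         else:
--             total_count += (current_count * (current_count + 1)) // 2
--             current_count = 1
--
--     total_count += (current_count * (current_count + 1)) // 2
--
--     return total_count
-- ===== SOURCE B (Python) =====
-- def count(s):
--     # Count by ending position instead of by run: the number of uniform
--     # substrings ending at position i is 1 if s[i] starts a new run, else one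
--     # more than the count at i-1; the answer is the plain sum of these
--     # per-position counts.  No run lengths or triangular numbers L*(L+1)//2
--     # are ever formed.
--     total = 0
--     ending = 0
--     prev = None
--     for ch in s:
--         ending = ending + 1 if ch == prev else 1
--         total += ending
--         prev = ch
--     return total
-- ===== Notes on version B (the rewrite author's own statement) =====
-- stated objective: alternative
-- what changed: Uses a different counting identity: instead of detecting maximal runs and adding the closed form L*(L+1)//2 per run, B sums, per position, the number of uniform substrings ending there (1 at a run start, else previous+1), iterating characters directly; no run lengths, triangular numbers, division or index arithmetic appear.
import Mathlib
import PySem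

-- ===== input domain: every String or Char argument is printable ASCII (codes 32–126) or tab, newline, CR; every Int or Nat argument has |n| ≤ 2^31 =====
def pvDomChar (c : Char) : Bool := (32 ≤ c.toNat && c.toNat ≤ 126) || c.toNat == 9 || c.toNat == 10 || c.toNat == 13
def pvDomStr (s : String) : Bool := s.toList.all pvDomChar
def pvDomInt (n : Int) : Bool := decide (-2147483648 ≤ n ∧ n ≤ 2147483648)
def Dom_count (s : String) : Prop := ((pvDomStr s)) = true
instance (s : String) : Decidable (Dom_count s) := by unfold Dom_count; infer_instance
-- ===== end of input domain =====

-- B counts uniform substrings by ending position (DP sum), instead of A's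
-- run detection with the closed form L*(L+1)//2 per maximal run ("alternative").

-- ===== PORT A =====
-- A: fused loop over i in range(1, len(s)) carrying (total_count, current_count).
def count (s : String) : Int :=
  let cs := s.toList
  if cs = [] then 0
  else
    let st := (PySem.List.pyRange 1 (PySem.List.len cs) 1).foldl
      (fun (acc : Int × Int) i =>
        if PySem.List.pyGetD cs i 'a' = PySem.List.pyGetD cs (i - 1) 'a' then
          (acc.1, acc.2 + 1)
        else
          (acc.1 + PySem.Int.floordiv (acc.2 * (acc.2 + 1)) 2, 1))
      ((0 : Int), (1 : Int))
    st.1 + PySem.Int.floordiv (st.2 * (st.2 + 1)) 2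

-- ===== PORT B =====
-- Source B: one fold over the characters carrying (total, ending, prev : Option Char);
-- 'ch == prev' with prev = None is False, so the first character always resets.
def count_alt (s : String) : Int :=
  (s.toList.foldl
    (fun (st : Int × Int × Option Char) ch =>
      let e := if some ch = st.2.2 then st.2.1 + 1 else 1
      (st.1 + e, e, some ch))
    ((0 : Int), (0 : Int), (none : Option Char))).1

-- ===== PRECONDITION & SPEC =====
def Spec_count (s : String) (out : Int) : Prop := out = count_alt s
instance (s : String) (out : Int) : Decidable (Spec_count s out) := by unfold Spec_count; infer_instance

-- ===== CLAIM =====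
def Claim_equal_count : Prop := ∀ (s : String), Dom_count s → Spec_count s (count s)

-- ===== LEMMAS AND PROOFS =====

-- A's loop, written as a structural recursion carrying the previous character.
def loopA (prev : Char) (acc : Int × Int) : List Char → Int × Int
  | [] => acc
  | x :: xs =>
    if x = prev then loopA x (acc.1, acc.2 + 1) xs
    else loopA x (acc.1 + PySem.Int.floordiv (acc.2 * (acc.2 + 1)) 2, 1) xs

theorem loopA_cons (prev x : Char) (acc : Int × Int) (xs : List Char) :
    loopA prev acc (x :: xs)
      = if x = prev then loopA x (acc.1, acc.2 + 1) xs
        else loopA x (acc.1 + PySem.Int.floordiv (acc.2 * (acc.2 + 1)) 2, 1) xs := rfl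

def finishA (acc : Int × Int) : Int :=
  acc.1 + PySem.Int.floordiv (acc.2 * (acc.2 + 1)) 2

-- the triangular number as A computes it, on a Nat argument
def tri (n : Nat) : Int := PySem.Int.floordiv ((n : Int) * ((n : Int) + 1)) 2

theorem tri_eq (n : Nat) : tri n = ((n * (n + 1) / 2 : Nat) : Int) := by
  unfold tri
  have : ((n : Int) * ((n : Int) + 1)) = ((n * (n + 1) : Nat) : Int) := by push_cast; ring
  rw [this]
  exact_mod_cast PySem.Int.floordiv_natCast (n * (n + 1)) 2

theorem tri_succ (n : Nat) : tri (n + 1) = tri n + (n + 1) := by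
  rw [tri_eq, tri_eq]
  have h0 : n * (n + 1) % 2 = 0 := Nat.even_iff.mp (Nat.even_mul_succ_self n)
  have h1 : (n + 1) * (n + 1 + 1) = n * (n + 1) + 2 * (n + 1) := by ring
  have : (n + 1) * (n + 1 + 1) / 2 = n * (n + 1) / 2 + (n + 1) := by omega
  rw [this]; push_cast; ring

-- B's fold step, named for the proofs
def stepB (st : Int × Int × Option Char) (ch : Char) : Int × Int × Option Char :=
  let e := if some ch = st.2.2 then st.2.1 + 1 else 1
  (st.1 + e, e, some ch)

-- bridge: A's index fold from i to len cs equals loopA on the suffix, with prev = cs[i-1].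
theorem bridge (cs : List Char) (i : Nat) (hi : 1 ≤ i) (hlen : i ≤ cs.length)
    (acc : Int × Int) :
    (PySem.List.pyRange (i : Int) (PySem.List.len cs) 1).foldl
      (fun (acc : Int × Int) j =>
        if PySem.List.pyGetD cs j 'a' = PySem.List.pyGetD cs (j - 1) 'a' then
          (acc.1, acc.2 + 1)
        else
          (acc.1 + PySem.Int.floordiv (acc.2 * (acc.2 + 1)) 2, 1))
      acc
    = loopA (cs.getD (i - 1) 'a') acc (cs.drop i) := by
  induction hk : cs.length - i generalizing i acc with
  | zero =>
    have h1 : cs.length ≤ i := by omega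
    rw [PySem.List.pyRange_one_eq_nil (by simp [PySem.List.len_eq]; omega)]
    rw [List.drop_eq_nil_of_le h1]
    simp [loopA]
  | succ k ih =>
    have hik : i < cs.length := by omega
    rw [PySem.List.pyRange_one_cons (by simp [PySem.List.len_eq]; exact_mod_cast hik)]
    rw [List.foldl_cons]
    have hcast : ((i : Int) + 1) = ((i + 1 : Nat) : Int) := by push_cast; ring
    have hsub : ((i : Int) - 1) = ((i - 1 : Nat) : Int) := by
      push_cast [Nat.cast_sub hi]; ring
    rw [hcast, hsub, ih (i + 1) (by omega) (by omega) _ (by omega)]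
    have hgi : PySem.List.pyGetD cs ((i : Nat) : Int) 'a' = cs[i] := by
      rw [PySem.List.pyGetD_natCast, List.getD, List.getElem?_eq_getElem hik]; rfl
    have hgi1 : PySem.List.pyGetD cs (((i - 1 : Nat)) : Int) 'a' = cs.getD (i - 1) 'a' := by
      rw [PySem.List.pyGetD_natCast]
    have hsucc : (i + 1) - 1 = i := by omega
    have e1 : cs.getD i 'a' = cs[i] := by
      rw [List.getD, List.getElem?_eq_getElem hik]; rfl
    rw [List.drop_eq_getElem_cons hik, loopA_cons, hgi, hgi1, hsucc, e1]
    by_cases h : cs[i] = cs.getD (i - 1) 'a'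
    · rw [if_pos h, if_pos h]
    · rw [if_neg h, if_neg h]

-- joint invariant: inside a run of `prev` of current length c (≥ 1 in use),
-- B's total is A's banked total plus tri c, and B's ending count is c.
theorem foldB_eq_loopA (xs : List Char) (prev : Char) (t : Int) (c : Nat) :
    (xs.foldl stepB (t + tri c, (c : Int), some prev)).1
      = finishA (loopA prev (t, (c : Int)) xs) := by
  induction xs generalizing prev t c with
  | nil => simp [finishA, loopA, tri]
  | cons x xs ih =>
    rw [List.foldl_cons, loopA_cons]
    by_cases h : x = prev
    · subst h
      simp only [stepB, if_true]
      have h2 : ((c : Int) + 1) = ((c + 1 : Nat) : Int) := by push_cast; ring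
      rw [h2]
      have h1 : t + tri c + ((c + 1 : Nat) : Int) = t + tri (c + 1) := by
        rw [tri_succ]; push_cast; ring
      rw [h1]
      exact ih x t (c + 1)
    · have hne : some x ≠ some prev := by simpa using h
      simp only [stepB, if_neg hne, if_neg h]
      have h1 : t + tri c + 1 = (t + tri c) + tri 1 := by norm_num [tri]
      have h2 : PySem.Int.floordiv ((c : Int) * ((c : Int) + 1)) 2 = tri c := rfl
      rw [h1, h2]
      have := ih x (t + tri c) 1
      simpa using this

theorem count_eq_alt (s : String) : count s = count_alt s := by
  unfold count count_alt
  cases hcs : s.toList with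
  | nil => simp
  | cons c0 rest =>
    simp only [if_neg (List.cons_ne_nil c0 rest)]
    have hb := bridge (c0 :: rest) 1 (by omega) (by simp) ((0 : Int), (1 : Int))
    simp only [Nat.cast_one] at hb
    rw [hb]
    -- B's first step: prev = none never matches, state becomes (1, 1, some c0)
    have hstep :
        ((c0 :: rest).foldl stepB ((0 : Int), (0 : Int), (none : Option Char))).1
          = (rest.foldl stepB (((1 : Int), (1 : Int), some c0))).1 := by
      rw [List.foldl_cons]
      norm_num [stepB]
    have hB := foldB_eq_loopA rest c0 0 1
    simp only [Nat.cast_one, show (0 : Int) + tri 1 = 1 from by decide] at hB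
    simp only [List.getD, List.drop_one, List.tail_cons]
    show finishA (loopA c0 (0, 1) rest) = _
    rw [← hB, ← hstep]
    rfl

-- ===== VERDICT =====
theorem count_spec : Claim_equal_count := by
  intro s _
  unfold Spec_count
  exact count_eq_alt s
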